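-- pv_equiv track=rewrite | github.com/AI4Bharat/Chitralekha-Backend | backend/translation/utils.py | split_at
-- ===== SOURCE A (Python) =====
-- def split_at(string, delimiter):
--     """
--     Desc: Python's split function implementation
--     :param string: a string
--     :return: a list after breaking string on delimiter match
--     """
--     result_list = []
--     if not delimiter:
--         raise ValueError("Empty Separator")
--
--     if not string:
--         return [string]
--     start = 0
--     for index, char in enumerate(string):
--         if char == delimiter:
--             if not (index < len(string) - 1 and string[index + 1].isdigit()):
--                 result_list.append(string[start:index])
--                 start = index + 1
--     if start == 0:
--         return [string]
--     result_list.append(string[start : index + 1])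
--
--     return result_list
-- ===== SOURCE B (Python) =====
-- def _first_cut(s, delimiter):
--     # index of the first valid cut point in s, or None
--     i = 0
--     while i < len(s):
--         if s[i] == delimiter and not (i + 1 < len(s) and s[i + 1].isdigit()):
--             return i
--         i += 1
--     return None
--
--
-- def split_at(string, delimiter):
--     if not delimiter:
--         raise ValueError("Empty Separator")
--     if not string:
--         return [string]
--     parts = []
--     rest = string
--     while True:
--         p = _first_cut(rest, delimiter)
--         if p is None:
--             parts.append(rest)
--             return parts
--         parts.append(rest[:p])
--         rest = rest[p + 1:]
-- ===== Notes on version B (the rewrite author's own statement) =====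
-- stated objective: alternative
-- what changed: A makes one indexed pass over the whole string, emitting segments inline while tracking a running start offset; B repeatedly searches the shrinking remainder for the first valid cut point and peels off one segment at a time, never using absolute indices into the original string.
import Mathlib
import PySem

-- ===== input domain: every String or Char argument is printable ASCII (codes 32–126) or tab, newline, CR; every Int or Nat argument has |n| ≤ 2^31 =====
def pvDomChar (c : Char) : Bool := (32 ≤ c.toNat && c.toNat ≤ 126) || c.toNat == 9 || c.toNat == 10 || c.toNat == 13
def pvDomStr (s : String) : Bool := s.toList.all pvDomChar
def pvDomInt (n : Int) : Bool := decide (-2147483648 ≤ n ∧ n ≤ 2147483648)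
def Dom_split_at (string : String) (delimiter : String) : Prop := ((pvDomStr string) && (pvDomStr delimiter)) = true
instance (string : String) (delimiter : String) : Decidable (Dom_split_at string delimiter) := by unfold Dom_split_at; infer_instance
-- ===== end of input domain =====

-- B replaces A's single indexed pass (running start offset, segments emitted inline) by
-- repeated find-first-cut on the shrinking remainder; same values, different algorithmic
-- decomposition (objective: alternative).

-- Python str.isdigit for one character, exact on the ASCII domain
def pvIsDigit (c : Char) : Bool := '0' ≤ c && c ≤ '9'

-- ===== PORT A =====
-- literal transliteration of A: one pass over enumerate(string), emitting a slice at each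
-- accepted delimiter; segments are built as List Char and turned into String at the end.
-- (On empty delimiter Python raises ValueError: excluded by Pre_split_at; port returns [].)
def split_at (string : String) (delimiter : String) : List String :=
  let cs := string.toList
  let d := delimiter.toList
  if d = [] then []
  else if cs = [] then [string]
  else
    let st := (PySem.List.enumerate cs).foldl
      (fun (st : List (List Char) × Int) ic =>
        if d = [ic.2] then
          -- 'index < len-1 and string[index+1].isdigit()': the pyGetD default is only
          -- reached when the bound test is false, where Python short-circuits
          if !(decide (ic.1 < (cs.length : Int) - 1) && pvIsDigit (PySem.List.pyGetD cs (ic.1 + 1) ' ')) then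
            (st.1 ++ [PySem.List.slice cs (some st.2) (some ic.1)], ic.1 + 1)
          else st
        else st)
      ([], 0)
    if st.2 = 0 then [string]
    -- after the loop 'index' = len(string) - 1 (string nonempty here)
    else (st.1 ++ [PySem.List.slice cs (some st.2) (some ((cs.length : Int) - 1 + 1))]).map String.ofList

-- ===== PORT B =====
-- transliteration of Source B's _first_cut: the index of the first valid cut point in s
-- (the scan over s becomes structural recursion over the same characters)
-- 'i + 1 < len(s) and s[i+1].isdigit()' seen from position i: is the next character a digit
def pvHeadDigit : List Char → Bool
  | [] => false
  | c :: _ => pvIsDigit c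

def pvFirstCut (d : List Char) : List Char → Option Nat
  | [] => none
  | c :: rest =>
    if d = [c] && !(pvHeadDigit rest)
    then some 0
    else (pvFirstCut d rest).map (· + 1)

-- the cut point is inside the string (needed for termination of pvSplitGo)
theorem pvFirstCut_lt (d : List Char) : ∀ (s : List Char) (p : Nat), pvFirstCut d s = some p → p < s.length := by
  intro s
  induction s with
  | nil => intro p h; simp [pvFirstCut] at h
  | cons c rest ih =>
    intro p h
    unfold pvFirstCut at h
    split at h
    · have hp : p = 0 := by
        have := h
        simp at this
        omega
      subst hp
      simp
    · cases hr : pvFirstCut d rest with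
      | none => rw [hr] at h; simp at h
      | some q =>
        rw [hr] at h
        simp at h
        have := ih q hr
        simp
        omega

-- transliteration of Source B's main while loop: peel off one segment per valid cut point,
-- recursing on the remainder after the cut
def pvSplitGo (d : List Char) (s : List Char) : List (List Char) :=
  match h : pvFirstCut d s with
  | none => [s]
  | some p => s.take p :: pvSplitGo d (s.drop (p + 1))
termination_by s.length
decreasing_by
  have := pvFirstCut_lt d s p h
  simp
  omega

def split_at_alt (string : String) (delimiter : String) : List String :=
  let cs := string.toList
  let d := delimiter.toList
  if d = [] then []
  else if cs = [] then [string]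
  else (pvSplitGo d cs).map String.ofList

-- ===== PRECONDITION & SPEC =====
-- Pre_ excludes only the empty delimiter, on which A raises ValueError("Empty Separator").
def Pre_split_at (string : String) (delimiter : String) : Prop := delimiter ≠ ""
instance (string : String) (delimiter : String) : Decidable (Pre_split_at string delimiter) := by unfold Pre_split_at; infer_instance
def pvWitness_split_at : String × String := ("a,b1,c", ",")

def Spec_split_at (string : String) (delimiter : String) (out : List String) : Prop := out = split_at_alt string delimiter
instance (string : String) (delimiter : String) (out : List String) : Decidable (Spec_split_at string delimiter out) := by unfold Spec_split_at; infer_instance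

-- ===== CLAIM (what is proved, stated in full; the proofs are below) =====
def Claim_equal_split_at : Prop := ∀ (string : String) (delimiter : String), Dom_split_at string delimiter → Pre_split_at string delimiter → Spec_split_at string delimiter (split_at string delimiter)

-- ===== LEMMAS AND PROOFS =====

-- A's acceptance test at absolute index i (the predicate its loop applies)
def pvCond (d : List Char) (cs : List Char) (i : Nat) : Bool :=
  d = [cs.getD i ' '] && !(decide (i < cs.length - 1) && pvIsDigit (cs.getD (i + 1) ' '))

-- all of A's accepted cut positions
def pvPositions (d : List Char) (cs : List Char) : List Nat :=
  (List.range cs.length).filter (pvCond d cs)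

-- A's slicing step over a list of cut positions
def pvStep (cs : List Char) (st : List (List Char) × Nat) (p : Nat) : List (List Char) × Nat :=
  (st.1 ++ [(cs.drop st.2).take (p - st.2)], p + 1)

-- positions-then-slice form of A's inner computation
def pvCoreFold (d : List Char) (cs : List Char) : List (List Char) :=
  let u := (pvPositions d cs).foldl (pvStep cs) ([], 0)
  u.1 ++ [cs.drop u.2]

-- the acceptance test only looks at the suffix from its index on
theorem pvCond_succ (d : List Char) (c : Char) (rest : List Char) (i : Nat) :
    pvCond d (c :: rest) (i + 1) = pvCond d rest i := by
  unfold pvCond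
  have h2 : (i + 1 < (c :: rest).length - 1) ↔ (i < rest.length - 1) := by
    cases rest <;> simp
  rw [show (decide (i + 1 < (c :: rest).length - 1)) = (decide (i < rest.length - 1)) from
    decide_eq_decide.mpr h2]
  simp

theorem pvCond_shift (d : List Char) (k : Nat) : ∀ (cs : List Char) (i : Nat),
    pvCond d cs (k + i) = pvCond d (cs.drop k) i := by
  induction k with
  | zero => simp
  | succ k ih =>
    intro cs i
    cases cs with
    | nil =>
      unfold pvCond
      simp [List.getD]
    | cons c rest =>
      have : k + 1 + i = (k + i) + 1 := by omega
      rw [this, pvCond_succ, ih]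
      simp

-- pvFirstCut at the head matches pvCond at index 0
theorem pvCond_zero (d : List Char) (c : Char) (rest : List Char) :
    pvCond d (c :: rest) 0 = (d = [c] && !(pvHeadDigit rest)) := by
  unfold pvCond pvHeadDigit
  cases rest with
  | nil => simp [pvIsDigit, List.getD]
  | cons c2 r2 => simp [List.getD]

theorem pvFirstCut_none (d : List Char) : ∀ (cs : List Char),
    pvFirstCut d cs = none → ∀ i < cs.length, pvCond d cs i = false := by
  intro cs
  induction cs with
  | nil => intro _ i hi; simp at hi
  | cons c rest ih =>
    intro h i hi
    unfold pvFirstCut at h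
    split at h
    · exact absurd h (by simp)
    · rename_i hcnd
      have hr : pvFirstCut d rest = none := by
        cases hr : pvFirstCut d rest with
        | none => rfl
        | some q => rw [hr] at h; simp at h
      cases i with
      | zero => rw [pvCond_zero]; simpa using hcnd
      | succ j =>
        rw [pvCond_succ]
        exact ih hr j (by simp at hi; omega)

theorem pvFirstCut_some (d : List Char) : ∀ (cs : List Char) (p : Nat),
    pvFirstCut d cs = some p →
    pvCond d cs p = true ∧ ∀ i < p, pvCond d cs i = false := by
  intro cs
  induction cs with
  | nil => intro p h; simp [pvFirstCut] at h
  | cons c rest ih =>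
    intro p h
    unfold pvFirstCut at h
    split at h
    · rename_i hcnd
      simp at h
      subst h
      exact ⟨by rw [pvCond_zero]; simpa using hcnd, by intro i hi; omega⟩
    · rename_i hcnd
      cases hr : pvFirstCut d rest with
      | none => rw [hr] at h; simp at h
      | some q =>
        rw [hr] at h; simp at h
        obtain ⟨h1, h2⟩ := ih q hr
        subst h
        refine ⟨by rw [pvCond_succ]; exact h1, ?_⟩
        intro i hi
        cases i with
        | zero => rw [pvCond_zero]; simpa using hcnd
        | succ j => rw [pvCond_succ]; exact h2 j (by omega)

-- pvPositions decomposes at the first cut point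
theorem pvPositions_none (d : List Char) (cs : List Char) (h : pvFirstCut d cs = none) :
    pvPositions d cs = [] := by
  unfold pvPositions
  rw [List.filter_eq_nil_iff]
  intro i hi
  simp only [List.mem_range] at hi
  simp [pvFirstCut_none d cs h i hi]

theorem pvPositions_some (d : List Char) (cs : List Char) (p : Nat) (h : pvFirstCut d cs = some p) :
    pvPositions d cs = p :: (pvPositions d (cs.drop (p + 1))).map (· + (p + 1)) := by
  obtain ⟨hp, hlt⟩ := pvFirstCut_some d cs p h
  have hplen := pvFirstCut_lt d cs p h
  unfold pvPositions
  have hsplit : List.range cs.length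
      = List.range (p + 1) ++ (List.range (cs.length - (p + 1))).map (· + (p + 1)) := by
    have hlen2 : cs.length = (p + 1) + (cs.length - (p + 1)) := by omega
    conv_lhs => rw [hlen2]
    rw [List.range_add]
    congr 1
    simp [Nat.add_comm]
  rw [hsplit, List.filter_append]
  have h1 : (List.range (p + 1)).filter (pvCond d cs) = [p] := by
    rw [List.range_succ, List.filter_append]
    have : (List.range p).filter (pvCond d cs) = [] := by
      rw [List.filter_eq_nil_iff]
      intro i hi
      simp only [List.mem_range] at hi
      simp [hlt i hi]
    rw [this]
    simp [hp]
  rw [h1]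
  have h2 : ((List.range (cs.length - (p + 1))).map (· + (p + 1))).filter (pvCond d cs)
      = ((List.range (cs.length - (p + 1))).filter (fun j => pvCond d (cs.drop (p + 1)) j)).map (· + (p + 1)) := by
    rw [List.filter_map]
    congr 1
    apply List.filter_congr
    intro j _
    simp only [Function.comp]
    have : j + (p + 1) = (p + 1) + j := by omega
    rw [this, pvCond_shift]
  rw [h2]
  have hlen : cs.length - (p + 1) = (cs.drop (p + 1)).length := by simp
  rw [hlen]
  rfl

-- folding A's slicing step from a non-empty accumulator just prepends it
theorem pvFold_acc (cs : List Char) : ∀ (qs : List Nat) (res : List (List Char)) (s : Nat),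
    qs.foldl (pvStep cs) (res, s)
      = (res ++ (qs.foldl (pvStep cs) ([], s)).1, (qs.foldl (pvStep cs) ([], s)).2) := by
  intro qs
  induction qs with
  | nil => simp
  | cons q qs ih =>
    intro res s
    simp only [List.foldl_cons]
    rw [show pvStep cs (res, s) q = ((pvStep cs (res, s) q).1, (pvStep cs (res, s) q).2) from rfl,
      ih (pvStep cs (res, s) q).1 (pvStep cs (res, s) q).2,
      show pvStep cs ([], s) q = ((pvStep cs ([], s) q).1, (pvStep cs ([], s) q).2) from rfl,
      ih (pvStep cs ([], s) q).1 (pvStep cs ([], s) q).2]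
    simp [pvStep]

-- shifting every cut position by k and the start by k slices the k-dropped string
theorem pvFold_shift (cs : List Char) (k : Nat) : ∀ (qs : List Nat) (s : Nat),
    (qs.map (· + k)).foldl (pvStep cs) ([], s + k)
      = ((qs.foldl (pvStep (cs.drop k)) ([], s)).1, (qs.foldl (pvStep (cs.drop k)) ([], s)).2 + k) := by
  intro qs
  induction qs with
  | nil => simp
  | cons q qs ih =>
    intro s
    simp only [List.map_cons, List.foldl_cons]
    have e1 : cs.drop (s + k) = (cs.drop k).drop s := by
      rw [List.drop_drop, Nat.add_comm]
    have e2 : q + k - (s + k) = q - s := by omega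
    have e3 : q + k + 1 = (q + 1) + k := by omega
    have hstep : pvStep cs ([], s + k) (q + k) = ([((cs.drop k).drop s).take (q - s)], (q + 1) + k) := by
      unfold pvStep
      simp only [List.nil_append]
      rw [e1, e2, e3]
    have hstep2 : pvStep (cs.drop k) ([], s) q = ([((cs.drop k).drop s).take (q - s)], q + 1) := by
      unfold pvStep
      simp
    rw [hstep, pvFold_acc cs (qs.map (· + k)), ih (q + 1),
      hstep2, pvFold_acc (cs.drop k) qs [((cs.drop k).drop s).take (q - s)] (q + 1)]

-- B's remainder recursion computes A's positions-then-slice form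
theorem pvSplitGo_eq_core (d : List Char) (cs : List Char) :
    pvSplitGo d cs = pvCoreFold d cs := by
  unfold pvSplitGo
  cases h : pvFirstCut d cs with
  | none =>
    unfold pvCoreFold
    rw [pvPositions_none d cs h]
    simp
  | some p =>
    have hrec := pvSplitGo_eq_core d (cs.drop (p + 1))
    unfold pvCoreFold
    rw [pvPositions_some d cs p h]
    simp only [List.foldl_cons]
    have hstep0 : pvStep cs ([], 0) p = ([cs.take p], p + 1) := by
      simp [pvStep]
    rw [hstep0]
    rw [pvFold_acc cs ((pvPositions d (cs.drop (p + 1))).map (· + (p + 1)))]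
    have := pvFold_shift cs (p + 1) (pvPositions d (cs.drop (p + 1))) 0
    simp only [Nat.zero_add] at this
    rw [this]
    rw [hrec]
    unfold pvCoreFold
    simp [List.drop_drop, Nat.add_comm]
termination_by cs.length
decreasing_by
  have := pvFirstCut_lt d cs p h
  simp
  omega

-- the B-side fold (pvStep with Nat state) tracks A's Int-state slicing fold
theorem pv_fold_eq (cs : List Char) (ps : List Nat) (res : List (List Char)) (s : Nat) :
    ps.foldl
      (fun (st : List (List Char) × Int) (j : Nat) =>
        (st.1 ++ [PySem.List.slice cs (some st.2) (some (j : Int))], (j : Int) + 1))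
      (res, (s : Int))
    = (let t := ps.foldl (pvStep cs) (res, s);
       (t.1, (t.2 : Int))) := by
  induction ps generalizing res s with
  | nil => simp
  | cons p ps ih =>
    simp only [List.foldl_cons, PySem.List.slice_natCast]
    have : ((p : Int) + 1) = ((p + 1 : Nat) : Int) := by push_cast; ring
    rw [this, ih]
    rfl

-- the second component of the slicing fold is positive when the position list is nonempty
theorem pv_fold_pos (cs : List Char) (ps : List Nat) (res : List (List Char)) (s : Nat)
    (h : 0 < s ∨ ps ≠ []) :
    0 < (ps.foldl (pvStep cs) (res, s)).2 := by
  induction ps generalizing res s with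
  | nil => simpa using h.resolve_right (by simp)
  | cons p ps ih => exact ih _ _ (Or.inl (Nat.succ_pos p))

-- A equals the positions-then-slice form, segment for segment
theorem pvA_eq_core (string : String) (delimiter : String) (hpre : delimiter ≠ "") :
    split_at string delimiter = split_at_alt string delimiter := by
  unfold split_at split_at_alt
  simp only []
  set cs := string.toList with hcs
  set d := delimiter.toList with hd
  have hdne : d ≠ [] := fun h => hpre (String.toList_eq_nil_iff.mp h)
  rw [if_neg hdne, if_neg hdne]
  by_cases hcsnil : cs = []
  · rw [if_pos hcsnil, if_pos hcsnil]
  · rw [if_neg hcsnil, if_neg hcsnil]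
    set n := cs.length with hn
    have hn1 : 1 ≤ n := by
      rw [hn]
      exact List.length_pos_iff.mpr hcsnil
    rw [PySem.List.enumerate_eq_map_pyRange cs ' ']
    have hlen : PySem.List.len cs = (n : Int) := by simp [PySem.List.len, hn]
    rw [hlen, PySem.List.pyRange_zero_natCast, List.foldl_map, List.foldl_map]
    have hfun :
        (fun (st : List (List Char) × Int) (k : Nat) =>
          (fun (st : List (List Char) × Int) ic =>
            if d = [ic.2] then
              if !(decide (ic.1 < (n : Int) - 1) && pvIsDigit (PySem.List.pyGetD cs (ic.1 + 1) ' ')) then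
                (st.1 ++ [PySem.List.slice cs (some st.2) (some ic.1)], ic.1 + 1)
              else st
            else st) st ((fun j => (j, PySem.List.pyGetD cs j ' ')) ((fun k : Nat => (k : Int)) k)))
        = (fun (st : List (List Char) × Int) (k : Nat) =>
            if pvCond d cs k then
              (st.1 ++ [PySem.List.slice cs (some st.2) (some (k : Int))], (k : Int) + 1)
            else st) := by
      funext st k
      have hcast : ((k : Int) + 1) = ((k + 1 : Nat) : Int) := by push_cast; ring
      have hdec : decide ((k : Int) < (n : Int) - 1) = decide (k < n - 1) := by
        by_cases h : (k : Int) < (n : Int) - 1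
        · rw [decide_eq_true h, decide_eq_true (by omega)]
        · rw [decide_eq_false h, decide_eq_false (by omega)]
      simp only [PySem.List.pyGetD_natCast, hcast, hdec]
      unfold pvCond
      rw [← hn]
      by_cases h1 : d = [cs.getD k ' ']
      · simp [h1]
      · simp only [List.getD] at h1
        simp [h1]
    rw [hfun, PySem.List.foldl_if_eq_foldl_filter (pvCond d cs)]
    have hpsdef : (List.range n).filter (pvCond d cs) = pvPositions d cs := by
      unfold pvPositions; rw [← hn]
    rw [hpsdef]
    set ps := pvPositions d cs with hps
    have h0 : ((0 : Nat) : Int) = (0 : Int) := rfl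
    rw [← h0, pv_fold_eq cs ps [] 0]
    rw [pvSplitGo_eq_core d cs]
    unfold pvCoreFold
    rw [← hps]
    by_cases hpsnil : ps = []
    · rw [hpsnil]
      simp
      rw [String.ofList_toList]
    · set t := ps.foldl (pvStep cs) ([], 0) with ht
      have hpos : 0 < t.2 := pv_fold_pos cs ps [] 0 (Or.inr hpsnil)
      rw [if_neg (by simp only []; omega)]
      have hnn : ((n : Int) - 1 + 1) = ((n : Nat) : Int) := by ring
      rw [hnn, PySem.List.slice_natCast]
      have hdropeq : (cs.drop t.2).take (n - t.2) = cs.drop t.2 :=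
        List.take_of_length_le (by simp [hn])
      rw [hdropeq]

-- ===== VERDICT (by name: the statement is the Claim_ definition above) =====
theorem split_at_spec : Claim_equal_split_at := by
  intro string delimiter _ hpre
  unfold Spec_split_at
  exact pvA_eq_core string delimiter hpre
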